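-- pv_equiv track=rewrite | github.com/daniel-reich/ubiquitous-fiesta | tfbKAYwHq2ot2FK3i_3.py | non_repeats
-- ===== SOURCE A (Python) =====
-- def non_repeats(n):
--   i=0
--   j=0
--   s=0
--   while(i<n):
--     x=1
--     j=0
--     base=n-1
--     z=0
--     while(j<=i):
--       x*=base
--       j+=1
--       z+=1
--       if(z>=2):
--         base-=1
--     s+=x
--     i+=1
--   return s
-- ===== SOURCE B (Python) =====
-- def non_repeats(n):
--     s = 0
--     t = n - 1
--     for i in range(n):
--         s += t
--         t *= n - 1 - i
--     return s
-- ===== Notes on version B (the rewrite author's own statement) =====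
-- stated objective: faster
-- what changed: Replaces the nested loop that rebuilds each falling-factorial product from scratch with a single pass maintaining the running product incrementally.
import Mathlib
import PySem

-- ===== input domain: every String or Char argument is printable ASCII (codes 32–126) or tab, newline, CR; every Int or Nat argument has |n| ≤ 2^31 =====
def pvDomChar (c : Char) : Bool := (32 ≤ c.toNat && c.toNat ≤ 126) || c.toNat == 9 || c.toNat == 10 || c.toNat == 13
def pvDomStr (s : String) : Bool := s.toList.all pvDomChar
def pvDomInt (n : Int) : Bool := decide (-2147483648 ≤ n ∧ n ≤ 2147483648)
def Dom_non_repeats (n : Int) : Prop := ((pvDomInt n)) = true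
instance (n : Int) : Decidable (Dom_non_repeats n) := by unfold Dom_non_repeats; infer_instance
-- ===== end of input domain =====

-- B replaces A's O(n^2) nested loops (each term's product rebuilt from scratch)
-- by one O(n) pass keeping the running product; return values are identical.

-- ===== PORT A =====
-- inner while(j<=i): x*=base; j+=1; z+=1; if z>=2: base-=1
def nonRepeatsInner (i j x base z : Int) : Int :=
  if j ≤ i then
    nonRepeatsInner i (j + 1) (x * base) (if z + 1 ≥ 2 then base - 1 else base) (z + 1)
  else x
termination_by (i + 1 - j).toNat
decreasing_by omega

-- outer while(i<n): x = inner loop from x=1, j=0, base=n-1, z=0; s+=x; i+=1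
def nonRepeatsOuter (n i s : Int) : Int :=
  if i < n then nonRepeatsOuter n (i + 1) (s + nonRepeatsInner i 0 1 (n - 1) 0) else s
termination_by (n - i).toNat
decreasing_by omega

def non_repeats (n : Int) : Int := nonRepeatsOuter n 0 0

-- ===== PORT B =====
-- for i in range(n): s += t; t *= n - 1 - i   (state (s, t), s starts 0, t starts n-1)
def non_repeats_alt (n : Int) : Int :=
  ((PySem.List.pyRange 0 n 1).foldl
    (fun (st : Int × Int) i => (st.1 + st.2, st.2 * (n - 1 - i))) (0, n - 1)).1

-- ===== PRECONDITION & SPEC =====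
def Spec_non_repeats (n : Int) (out : Int) : Prop := out = non_repeats_alt n
instance (n : Int) (out : Int) : Decidable (Spec_non_repeats n out) := by unfold Spec_non_repeats; infer_instance

-- ===== CLAIM (what is proved, stated in full; the proofs are below) =====
def Claim_equal_non_repeats : Prop := ∀ (n : Int), Dom_non_repeats n → Spec_non_repeats n (non_repeats n)

-- ===== LEMMAS AND PROOFS =====

-- falling factorial: fall b k = b * (b-1) * ... * (b-k+1)
def fall (b : Int) : Nat → Int
  | 0 => 1
  | k + 1 => fall b k * (b - k)

theorem fall_succ_left (b : Int) (k : Nat) : fall b (k + 1) = b * fall (b - 1) k := by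
  induction k with
  | zero => simp [fall]
  | succ k ih =>
    show fall b (k + 1) * (b - (k + 1 : Nat)) = b * (fall (b - 1) k * (b - 1 - k))
    rw [ih]; push_cast; ring

-- closed form of A's inner loop once z ≥ 1 (from then on base decrements every step)
theorem inner_closed (k : Nat) : ∀ (i j x base z : Int), 1 ≤ z → (i + 1 - j).toNat = k →
    nonRepeatsInner i j x base z = x * fall base k := by
  induction k with
  | zero =>
    intro i j x base z _ hk
    rw [nonRepeatsInner]
    have : ¬ j ≤ i := by omega
    simp [this, fall]
  | succ k ih =>
    intro i j x base z hz hk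
    rw [nonRepeatsInner]
    have hji : j ≤ i := by omega
    have hz2 : z + 1 ≥ 2 := by omega
    simp only [hji, if_pos, hz2]
    rw [ih i (j + 1) (x * base) (base - 1) (z + 1) (by omega) (by omega)]
    rw [fall_succ_left]; ring

-- A's i-th term is (n-1) * fall (n-1) i  (first factor repeats before decrementing starts)
theorem termA (n i : Int) (hi : 0 ≤ i) :
    nonRepeatsInner i 0 1 (n - 1) 0 = (n - 1) * fall (n - 1) i.toNat := by
  rw [nonRepeatsInner]
  have h0 : (0 : Int) ≤ i := hi
  simp only [h0, if_pos]
  have : ¬ ((0 : Int) + 1 ≥ 2) := by omega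
  simp only [this, if_neg, not_false_iff]
  rw [show (0:Int)+1 = 1 from rfl, inner_closed i.toNat i 1 (1 * (n - 1)) (n - 1) 1 (by omega) (by omega)]
  ring

-- lockstep: A's outer loop equals B's fold over the remaining range
theorem lockstep (n : Int) (m : Nat) : ∀ (i s : Int), 0 ≤ i → (n - i).toNat = m →
    nonRepeatsOuter n i s =
      ((PySem.List.pyRange i n 1).foldl
        (fun (st : Int × Int) j => (st.1 + st.2, st.2 * (n - 1 - j)))
        (s, (n - 1) * fall (n - 1) i.toNat)).1 := by
  induction m with
  | zero =>
    intro i s hi hm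
    have hni : ¬ i < n := by omega
    rw [nonRepeatsOuter]
    simp [hni, PySem.List.pyRange]
  | succ m ih =>
    intro i s hi hm
    have hin : i < n := by omega
    rw [nonRepeatsOuter]
    simp only [hin, if_pos]
    rw [PySem.List.pyRange_one_cons hin, List.foldl_cons]
    have ht : (n - 1) * fall (n - 1) i.toNat * (n - 1 - i)
        = (n - 1) * fall (n - 1) (i + 1).toNat := by
      have h1 : (i + 1).toNat = i.toNat + 1 := by omega
      rw [h1, fall]
      have h2 : ((i.toNat : Int)) = i := by omega
      rw [h2]; ring
    rw [termA n i hi]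
    calc nonRepeatsOuter n (i + 1) (s + (n - 1) * fall (n - 1) i.toNat)
        = ((PySem.List.pyRange (i + 1) n 1).foldl
            (fun (st : Int × Int) j => (st.1 + st.2, st.2 * (n - 1 - j)))
            (s + (n - 1) * fall (n - 1) i.toNat, (n - 1) * fall (n - 1) (i + 1).toNat)).1 :=
          ih (i + 1) _ (by omega) (by omega)
      _ = _ := by rw [ht]

-- ===== VERDICT (by name: the statement is the Claim_ definition above) =====
theorem non_repeats_spec : Claim_equal_non_repeats := by
  intro n _
  show non_repeats n = non_repeats_alt n
  unfold non_repeats non_repeats_alt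
  have := lockstep n (n - 0).toNat 0 0 (by omega) rfl
  simpa [fall] using this
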